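-- pv_equiv track=rewrite | github.com/katearb/2020-2-level-labs | lab_2/main.py | fill_lcs_matrix
-- ===== SOURCE A (Python) =====
-- def create_zero_matrix(rows: int, columns: int) -> list:
--     """
--     Creates a matrix rows * columns where each element is zero
--     :param rows: a number of rows
--     :param columns: a number of columns
--     :return: a matrix with 0s
--     e.g. rows = 2, columns = 2
--     --> [[0, 0], [0, 0]]
--     """
--
--     is_not_int_rows = not isinstance(rows, int)
--     is_not_int_columns = not isinstance(columns, int)
--
--     if is_not_int_rows or is_not_int_columns or rows <= 0 or columns <= 0:
--         return []
--
--     return [[0 for _ in range(columns)] for _ in range(rows)]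
--
-- def fill_lcs_matrix(first_sentence_tokens: tuple, second_sentence_tokens: tuple) -> list:
--     """
--     Fills a longest common subsequence matrix using the Needleman–Wunsch algorithm
--     :param first_sentence_tokens: a tuple of tokens
--     :param second_sentence_tokens: a tuple of tokens
--     :return: a lcs matrix
--     """
--     is_not_tuple_fst = not isinstance(first_sentence_tokens, tuple)
--     is_not_tuple_sst = not isinstance(second_sentence_tokens, tuple)
--
--     if is_not_tuple_fst or is_not_tuple_sst or not first_sentence_tokens or not second_sentence_tokens:
--         return[]
--
--     lcs_matrix = create_zero_matrix(len(first_sentence_tokens), len(second_sentence_tokens))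
--     for ind_1, elem_1 in enumerate(first_sentence_tokens):
--         for ind_2, elem_2 in enumerate(second_sentence_tokens):
--             if elem_1 == elem_2:
--                 if (ind_1 - 1) < 0 or (ind_2 - 1) < 0:
--                     lcs_matrix[ind_1][ind_2] = 1
--                 else:
--                     lcs_matrix[ind_1][ind_2] = lcs_matrix[ind_1 - 1][ind_2 - 1] + 1
--             else:
--                 if (ind_1 - 1) < 0 or (ind_2 - 1) < 0:
--                     lcs_matrix[ind_1][ind_2] = 1
--                 else:
--                     lcs_matrix[ind_1][ind_2] = max([lcs_matrix[ind_1][ind_2 - 1], lcs_matrix[ind_1 - 1][ind_2]])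
--
--     return lcs_matrix
-- ===== SOURCE B (Python) =====
-- def fill_lcs_matrix(first_sentence_tokens: tuple, second_sentence_tokens: tuple) -> list:
--     """Top-down memoized recursion over the recurrence (borders are 1, as in the
--     original) instead of bottom-up zero-matrix mutation by nested indexed loops."""
--     if not first_sentence_tokens or not second_sentence_tokens:
--         return []
--     memo = {}
--
--     def cell(i, j):
--         got = memo.get((i, j))
--         if got is not None:
--             return got
--         if i == 0 or j == 0:
--             v = 1
--         elif first_sentence_tokens[i] == second_sentence_tokens[j]:
--             v = cell(i - 1, j - 1) + 1
--         else:
--             v = max(cell(i, j - 1), cell(i - 1, j))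
--         memo[(i, j)] = v
--         return v
--
--     return [[cell(i, j) for j in range(len(second_sentence_tokens))]
--             for i in range(len(first_sentence_tokens))]
-- ===== Notes on version B (the rewrite author's own statement) =====
-- stated objective: alternative
-- what changed: Replaces the bottom-up zero-matrix allocation and in-place cell mutation via border-guarded nested index loops by a top-down memoized recursion: a helper cell(i,j) recursively evaluates the recurrence (1 on the borders, diag+1 on match, else max of left/up), caching results in a dict, and the matrix is produced by requesting every cell.
import Mathlib
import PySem

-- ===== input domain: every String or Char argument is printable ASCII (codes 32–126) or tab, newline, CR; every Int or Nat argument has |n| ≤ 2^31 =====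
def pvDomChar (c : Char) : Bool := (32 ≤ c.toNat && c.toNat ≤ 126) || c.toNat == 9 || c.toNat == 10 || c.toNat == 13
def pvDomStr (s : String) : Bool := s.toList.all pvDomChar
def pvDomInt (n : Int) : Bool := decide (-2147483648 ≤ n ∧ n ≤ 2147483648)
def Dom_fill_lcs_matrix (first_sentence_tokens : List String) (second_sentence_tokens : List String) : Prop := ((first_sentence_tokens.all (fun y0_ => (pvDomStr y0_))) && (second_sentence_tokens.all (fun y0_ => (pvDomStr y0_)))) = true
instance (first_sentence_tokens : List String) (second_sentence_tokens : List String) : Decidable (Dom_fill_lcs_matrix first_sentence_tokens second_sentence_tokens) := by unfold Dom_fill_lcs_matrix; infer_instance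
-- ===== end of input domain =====

-- B replaces A's bottom-up zero-matrix mutation by a top-down memoized recursion
-- (a dict-cached cell(i,j) over the same recurrence); return values are identical.

-- ===== PORT A =====
-- helper: create_zero_matrix from the same module
def create_zero_matrix (rows : Int) (columns : Int) : List (List Int) :=
  if ¬ (rows > 0) ∨ ¬ (columns > 0) then []
  else (PySem.List.pyRange 0 rows 1).map (fun _ => (PySem.List.pyRange 0 columns 1).map (fun _ => (0 : Int)))

-- helper: Python's `m[i][j] = v` (i, j are the always-in-range non-negative loop indices)
def pvMset (m : List (List Int)) (i j : Int) (v : Int) : List (List Int) :=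
  m.set i.toNat ((PySem.List.pyGetD m i []).set j.toNat v)

def fill_lcs_matrix (first_sentence_tokens : List String) (second_sentence_tokens : List String) : List (List Int) :=
  if first_sentence_tokens = [] ∨ second_sentence_tokens = [] then []
  else
    (PySem.List.enumerate first_sentence_tokens 0).foldl (fun m p1 =>
      (PySem.List.enumerate second_sentence_tokens 0).foldl (fun m p2 =>
        if p1.2 = p2.2 then
          if p1.1 - 1 < 0 ∨ p2.1 - 1 < 0 then pvMset m p1.1 p2.1 1
          else pvMset m p1.1 p2.1 (PySem.List.pyGetD (PySem.List.pyGetD m (p1.1 - 1) []) (p2.1 - 1) 0 + 1)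
        else
          if p1.1 - 1 < 0 ∨ p2.1 - 1 < 0 then pvMset m p1.1 p2.1 1
          else pvMset m p1.1 p2.1 (max (PySem.List.pyGetD (PySem.List.pyGetD m p1.1 []) (p2.1 - 1) 0)
                                       (PySem.List.pyGetD (PySem.List.pyGetD m (p1.1 - 1) []) p2.1 0))) m)
      (create_zero_matrix (first_sentence_tokens.length : Int) (second_sentence_tokens.length : Int))

-- ===== PORT B =====
-- helper: Source B's recursive `cell(i, j)` with its dict memo threaded through (Python
-- mutates one closure dict; here the dict is passed in and returned). The indices i, j
-- come from range(...) so they are Nat; f[i] / s[j] are in-range, ported as getD.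
def cellMemo (f s : List String) (memo : PySem.Dict (Int × Int) Int) (i j : Nat) :
    Int × PySem.Dict (Int × Int) Int :=
  match memo.get? ((i : Int), (j : Int)) with
  | some v => (v, memo)
  | none =>
    if i = 0 ∨ j = 0 then
      (1, memo.insert ((i : Int), (j : Int)) 1)
    else if f.getD i "" = s.getD j "" then
      let r := cellMemo f s memo (i - 1) (j - 1)
      (r.1 + 1, r.2.insert ((i : Int), (j : Int)) (r.1 + 1))
    else
      let r1 := cellMemo f s memo i (j - 1)
      let r2 := cellMemo f s r1.2 (i - 1) j
      (max r1.1 r2.1, r2.2.insert ((i : Int), (j : Int)) (max r1.1 r2.1))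
  termination_by (i, j)
  decreasing_by
    · apply Prod.Lex.left; omega
    · apply Prod.Lex.right'; omega; omega
    · apply Prod.Lex.left; omega

def fill_lcs_matrix_alt (first_sentence_tokens : List String) (second_sentence_tokens : List String) : List (List Int) :=
  if first_sentence_tokens = [] ∨ second_sentence_tokens = [] then []
  else
    ((List.range first_sentence_tokens.length).foldl (fun acc i =>
        let inner := (List.range second_sentence_tokens.length).foldl (fun acc2 j =>
            let r := cellMemo first_sentence_tokens second_sentence_tokens acc2.2 i j
            (acc2.1 ++ [r.1], r.2)) (([] : List Int), acc.2)
        (acc.1 ++ [inner.1], inner.2))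
      (([] : List (List Int)), (PySem.Dict.empty : PySem.Dict (Int × Int) Int))).1

-- ===== PRECONDITION & SPEC =====
def Spec_fill_lcs_matrix (first_sentence_tokens : List String) (second_sentence_tokens : List String) (out : List (List Int)) : Prop := out = fill_lcs_matrix_alt first_sentence_tokens second_sentence_tokens
instance (first_sentence_tokens : List String) (second_sentence_tokens : List String) (out : List (List Int)) : Decidable (Spec_fill_lcs_matrix first_sentence_tokens second_sentence_tokens out) := by unfold Spec_fill_lcs_matrix; infer_instance

-- ===== CLAIM (what is proved, stated in full; the proofs are below) =====
def Claim_equal_fill_lcs_matrix : Prop := ∀ (first_sentence_tokens : List String) (second_sentence_tokens : List String), Dom_fill_lcs_matrix first_sentence_tokens second_sentence_tokens → Spec_fill_lcs_matrix first_sentence_tokens second_sentence_tokens (fill_lcs_matrix first_sentence_tokens second_sentence_tokens)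

-- ===== LEMMAS AND PROOFS =====
-- the common cell recurrence both programs compute (border cells are 1, as in A)

def lcsCell (f s : List String) : Nat → Nat → Int
  | 0, _ => 1
  | _ + 1, 0 => 1
  | i + 1, j + 1 =>
      if f.getD (i + 1) "" = s.getD (j + 1) "" then lcsCell f s i j + 1
      else max (lcsCell f s (i + 1) j) (lcsCell f s i (j + 1))
  termination_by i j => (i, j)

def lcsRow (f s : List String) (i : Nat) : List Int :=
  (List.range s.length).map (fun j => lcsCell f s i j)

theorem lcsCell_border (f s : List String) (i j : Nat) (h : i = 0 ∨ j = 0) :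
    lcsCell f s i j = 1 := by
  rcases h with h | h
  · subst h; rw [lcsCell]
  · subst h; cases i with
    | zero => rw [lcsCell]
    | succ i' => rw [lcsCell]

-- ==== B-side: the memo invariant and correctness of cellMemo ====

def MemoOK (f s : List String) (m : PySem.Dict (Int × Int) Int) : Prop :=
  ∀ (i j : Nat) (v : Int), m.get? ((i : Int), (j : Int)) = some v → v = lcsCell f s i j

theorem memoOK_empty (f s : List String) : MemoOK f s PySem.Dict.empty := by
  intro i j v h
  simp [PySem.Dict.get?_empty] at h

theorem memoOK_insert (f s : List String) (m : PySem.Dict (Int × Int) Int)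
    (hm : MemoOK f s m) (i j : Nat) (v : Int) (hv : v = lcsCell f s i j) :
    MemoOK f s (m.insert ((i : Int), (j : Int)) v) := by
  intro i' j' w hw
  rw [PySem.Dict.get?_insert] at hw
  by_cases hk : ((i' : Int), (j' : Int)) = ((i : Int), (j : Int))
  · rw [if_pos hk] at hw
    have hi : i' = i := by
      have h1 : ((i' : Int), (j' : Int)).1 = ((i : Int), (j : Int)).1 := congrArg Prod.fst hk
      simp only at h1; exact_mod_cast h1
    have hj : j' = j := by
      have h2 : ((i' : Int), (j' : Int)).2 = ((i : Int), (j : Int)).2 := congrArg Prod.snd hk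
      simp only at h2; exact_mod_cast h2
    cases hw; subst hi; subst hj; exact hv
  · rw [if_neg hk] at hw
    exact hm i' j' w hw

theorem cellMemo_spec (f s : List String) (i j : Nat) (m : PySem.Dict (Int × Int) Int)
    (hm : MemoOK f s m) :
    (cellMemo f s m i j).1 = lcsCell f s i j ∧ MemoOK f s (cellMemo f s m i j).2 := by
  rw [cellMemo]
  cases hget : m.get? ((i : Int), (j : Int)) with
  | some v =>
      exact ⟨hm i j v hget, hm⟩
  | none =>
      simp only
      by_cases hb : i = 0 ∨ j = 0
      · rw [if_pos hb]
        refine ⟨(lcsCell_border f s i j hb).symm, ?_⟩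
        exact memoOK_insert f s m hm i j 1 (lcsCell_border f s i j hb).symm
      · rw [if_neg hb]
        push Not at hb
        obtain ⟨i', rfl⟩ : ∃ i', i = i' + 1 := ⟨i - 1, by omega⟩
        obtain ⟨j', rfl⟩ : ∃ j', j = j' + 1 := ⟨j - 1, by omega⟩
        have hrec : lcsCell f s (i' + 1) (j' + 1) =
            if f.getD (i' + 1) "" = s.getD (j' + 1) "" then lcsCell f s i' j' + 1
            else max (lcsCell f s (i' + 1) j') (lcsCell f s i' (j' + 1)) := by rw [lcsCell]
        by_cases he : f.getD (i' + 1) "" = s.getD (j' + 1) ""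
        · rw [if_pos he]
          simp only [Nat.add_sub_cancel]
          have ih := cellMemo_spec f s i' j' m hm
          have hval : (cellMemo f s m i' j').1 + 1 = lcsCell f s (i' + 1) (j' + 1) := by
            rw [ih.1, hrec, if_pos he]
          exact ⟨hval, memoOK_insert f s _ ih.2 (i' + 1) (j' + 1) _ hval⟩
        · rw [if_neg he]
          simp only [Nat.add_sub_cancel]
          have ih1 := cellMemo_spec f s (i' + 1) j' m hm
          have ih2 := cellMemo_spec f s i' (j' + 1) (cellMemo f s m (i' + 1) j').2 ih1.2
          have hval : max (cellMemo f s m (i' + 1) j').1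
              (cellMemo f s (cellMemo f s m (i' + 1) j').2 i' (j' + 1)).1
              = lcsCell f s (i' + 1) (j' + 1) := by
            rw [ih1.1, ih2.1, hrec, if_neg he]
          exact ⟨hval, memoOK_insert f s _ ih2.2 (i' + 1) (j' + 1) _ hval⟩
  termination_by (i, j)
  decreasing_by
    · apply Prod.Lex.left; omega
    · apply Prod.Lex.right'; omega; omega
    · apply Prod.Lex.left; omega

theorem b_inner (f s : List String) (i : Nat) (js : List Nat) :
    ∀ (acc : List Int) (m : PySem.Dict (Int × Int) Int), MemoOK f s m →
    (js.foldl (fun acc2 j =>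
        let r := cellMemo f s acc2.2 i j
        (acc2.1 ++ [r.1], r.2)) (acc, m)).1 = acc ++ js.map (fun j => lcsCell f s i j) ∧
    MemoOK f s ((js.foldl (fun acc2 j =>
        let r := cellMemo f s acc2.2 i j
        (acc2.1 ++ [r.1], r.2)) (acc, m)).2) := by
  induction js with
  | nil => intro acc m hm; exact ⟨by simp, hm⟩
  | cons j js' ih =>
      intro acc m hm
      rw [List.foldl_cons]
      have hc := cellMemo_spec f s i j m hm
      have := ih (acc ++ [(cellMemo f s m i j).1]) (cellMemo f s m i j).2 hc.2
      refine ⟨?_, this.2⟩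
      rw [this.1, hc.1]
      simp

theorem b_outer (f s : List String) (is : List Nat) :
    ∀ (acc : List (List Int)) (m : PySem.Dict (Int × Int) Int), MemoOK f s m →
    (is.foldl (fun acc i =>
        let inner := (List.range s.length).foldl (fun acc2 j =>
            let r := cellMemo f s acc2.2 i j
            (acc2.1 ++ [r.1], r.2)) (([] : List Int), acc.2)
        (acc.1 ++ [inner.1], inner.2)) (acc, m)).1 = acc ++ is.map (lcsRow f s) := by
  induction is with
  | nil => intro acc m hm; simp
  | cons i is' ih =>
      intro acc m hm
      rw [List.foldl_cons]
      have hin := b_inner f s i (List.range s.length) [] m hm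
      simp only
      have hrow : ((List.range s.length).foldl (fun acc2 j =>
          let r := cellMemo f s acc2.2 i j
          (acc2.1 ++ [r.1], r.2)) (([] : List Int), m)).1 = lcsRow f s i := by
        rw [hin.1]; simp [lcsRow]
      rw [hrow]
      have := ih (acc ++ [lcsRow f s i]) _ hin.2
      rw [this]
      simp

theorem alt_eq_rows (f s : List String) (hf : f ≠ []) (hs : s ≠ []) :
    fill_lcs_matrix_alt f s = (List.range f.length).map (lcsRow f s) := by
  rw [fill_lcs_matrix_alt, if_neg (by simp [hf, hs])]
  have := b_outer f s (List.range f.length) [] PySem.Dict.empty (memoOK_empty f s)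
  rw [this]
  simp

-- ==== A-side (unchanged machinery): A's loops compute the same rows ====

theorem pv_set_append_len {α : Type} (xs ys : List α) (v : α) (k : Nat) (hk : xs.length = k) :
    (xs ++ ys).set k v = xs ++ ys.set 0 v := by subst hk; simp

theorem pv_getD_append_lt {α : Type} (xs ys : List α) (k : Nat) (h : k < xs.length) (d : α) :
    (xs ++ ys).getD k d = xs.getD k d := by simp [List.getD, List.getElem?_append_left h]

theorem pv_getD_append_len {α : Type} (xs : List α) (y : α) (ys : List α) (d : α) (k : Nat)
    (hk : xs.length = k) : (xs ++ y :: ys).getD k d = y := by subst hk; simp [List.getD]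

def aRowPart (f s : List String) (i a : Nat) : List Int :=
  (List.range a).map (fun j => lcsCell f s i j) ++ List.replicate (s.length - a) 0

def aMat (f s : List String) (i a : Nat) : List (List Int) :=
  (List.range i).map (lcsRow f s) ++
    aRowPart f s i a :: List.replicate (f.length - 1 - i) (List.replicate s.length 0)

theorem a_inner (f s : List String) (i : Nat) (hi : i < f.length) (a : Nat) (ha : a ≤ s.length) :
    (PySem.List.pyRange (a : Int) (s.length : Int) 1).foldl (fun m j =>
      if PySem.List.pyGetD f (i : Int) "" = PySem.List.pyGetD s j "" then
        if (i : Int) - 1 < 0 ∨ j - 1 < 0 then pvMset m (i : Int) j 1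
        else pvMset m (i : Int) j (PySem.List.pyGetD (PySem.List.pyGetD m ((i : Int) - 1) []) (j - 1) 0 + 1)
      else
        if (i : Int) - 1 < 0 ∨ j - 1 < 0 then pvMset m (i : Int) j 1
        else pvMset m (i : Int) j (max (PySem.List.pyGetD (PySem.List.pyGetD m (i : Int) []) (j - 1) 0)
                                       (PySem.List.pyGetD (PySem.List.pyGetD m ((i : Int) - 1) []) j 0)))
      (aMat f s i a)
    = aMat f s i s.length := by
  induction hn : s.length - a generalizing a with
  | zero =>
      have : a = s.length := by omega
      subst this
      rw [PySem.List.pyRange_one_eq_nil (le_refl _)]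
      rfl
  | succ n ih =>
      have halt : (a : Int) < (s.length : Int) := by exact_mod_cast (by omega : a < s.length)
      rw [PySem.List.pyRange_one_cons halt, List.foldl_cons]
      -- the row currently being filled
      have hmidlen : ((List.range i).map (lcsRow f s)).length = i := by simp
      have hmid : PySem.List.pyGetD (aMat f s i a) (i : Int) [] = aRowPart f s i a := by
        rw [PySem.List.pyGetD_natCast, aMat, pv_getD_append_len _ _ _ _ _ hmidlen]
      have hset : ∀ v : Int, v = lcsCell f s i a →
          pvMset (aMat f s i a) (i : Int) (a : Int) v = aMat f s i (a + 1) := by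
        intro v hv
        rw [pvMset, hmid, Int.toNat_natCast, Int.toNat_natCast]
        have hrow : (aRowPart f s i a).set a v = aRowPart f s i (a + 1) := by
          rw [aRowPart, aRowPart]
          have hlen : ((List.range a).map (fun j => lcsCell f s i j)).length = a := by simp
          rw [pv_set_append_len _ _ _ _ hlen]
          have h2 : s.length - a = (s.length - (a + 1)) + 1 := by omega
          rw [h2, List.replicate_succ, List.set_cons_zero, hv,
              List.range_succ, List.map_append]
          simp
        rw [aMat, pv_set_append_len _ _ _ _ hmidlen, List.set_cons_zero, hrow, aMat]
      -- values read
      have hf1 : PySem.List.pyGetD f (i : Int) "" = f.getD i "" := PySem.List.pyGetD_natCast f i ""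
      have hs1 : PySem.List.pyGetD s (a : Int) "" = s.getD a "" := PySem.List.pyGetD_natCast s a ""
      have hstep :
          (if PySem.List.pyGetD f (i : Int) "" = PySem.List.pyGetD s ((a : Nat) : Int) "" then
            if (i : Int) - 1 < 0 ∨ ((a : Nat) : Int) - 1 < 0 then pvMset (aMat f s i a) (i : Int) ((a : Nat) : Int) 1
            else pvMset (aMat f s i a) (i : Int) ((a : Nat) : Int)
              (PySem.List.pyGetD (PySem.List.pyGetD (aMat f s i a) ((i : Int) - 1) []) (((a : Nat) : Int) - 1) 0 + 1)
          else
            if (i : Int) - 1 < 0 ∨ ((a : Nat) : Int) - 1 < 0 then pvMset (aMat f s i a) (i : Int) ((a : Nat) : Int) 1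
            else pvMset (aMat f s i a) (i : Int) ((a : Nat) : Int)
              (max (PySem.List.pyGetD (PySem.List.pyGetD (aMat f s i a) (i : Int) []) (((a : Nat) : Int) - 1) 0)
                   (PySem.List.pyGetD (PySem.List.pyGetD (aMat f s i a) ((i : Int) - 1) []) ((a : Nat) : Int) 0)))
          = aMat f s i (a + 1) := by
        by_cases hborder : (i : Int) - 1 < 0 ∨ ((a : Nat) : Int) - 1 < 0
        · have hcell : lcsCell f s i a = 1 := by
            rcases hborder with h | h
            · have : i = 0 := by omega
              subst this; rw [lcsCell]
            · have : a = 0 := by omega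
              subst this
              cases i with
              | zero => rw [lcsCell]
              | succ i' => rw [lcsCell]
          by_cases he : PySem.List.pyGetD f (i : Int) "" = PySem.List.pyGetD s ((a : Nat) : Int) ""
          · rw [if_pos he, if_pos hborder]; exact hset 1 hcell.symm
          · rw [if_neg he, if_pos hborder]; exact hset 1 hcell.symm
        · obtain ⟨i', rfl⟩ : ∃ i', i = i' + 1 := ⟨i - 1, by omega⟩
          obtain ⟨a', rfl⟩ : ∃ a', a = a' + 1 := ⟨a - 1, by omega⟩
          have ha' : a' + 1 < s.length := by exact_mod_cast halt
          have hci : ((i' + 1 : Nat) : Int) - 1 = ((i' : Nat) : Int) := by push_cast; ring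
          have hca : ((a' + 1 : Nat) : Int) - 1 = ((a' : Nat) : Int) := by push_cast; ring
          have hprev : PySem.List.pyGetD (aMat f s (i' + 1) (a' + 1)) (((i' + 1 : Nat) : Int) - 1) []
              = lcsRow f s i' := by
            rw [hci, PySem.List.pyGetD_natCast, aMat,
                pv_getD_append_lt _ _ _ (by simp) _, PySem.List.getD_map_range _ _ _ _ (Nat.lt_succ_self i')]
          have hprev1 : PySem.List.pyGetD (lcsRow f s i') (((a' + 1 : Nat) : Int) - 1) 0
              = lcsCell f s i' a' := by
            rw [hca, PySem.List.pyGetD_natCast, lcsRow,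
                PySem.List.getD_map_range _ _ _ _ (by omega : a' < s.length)]
          have hprev2 : PySem.List.pyGetD (lcsRow f s i') ((a' + 1 : Nat) : Int) 0
              = lcsCell f s i' (a' + 1) := by
            rw [PySem.List.pyGetD_natCast, lcsRow, PySem.List.getD_map_range _ _ _ _ ha']
          have hcur : PySem.List.pyGetD (aRowPart f s (i' + 1) (a' + 1)) (((a' + 1 : Nat) : Int) - 1) 0
              = lcsCell f s (i' + 1) a' := by
            rw [hca, PySem.List.pyGetD_natCast, aRowPart,
                pv_getD_append_lt _ _ _ (by simp) _, PySem.List.getD_map_range _ _ _ _ (Nat.lt_succ_self a')]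
          have hnb : ¬(((i' + 1 : Nat) : Int) - 1 < 0 ∨ ((a' + 1 : Nat) : Int) - 1 < 0) := by
            push_cast; omega
          rw [hf1, hs1] at *
          by_cases he : f.getD (i' + 1) "" = s.getD (a' + 1) ""
          · rw [if_pos he, if_neg hnb, hprev, hprev1]
            have hv : lcsCell f s (i' + 1) (a' + 1) = lcsCell f s i' a' + 1 := by
              rw [lcsCell, if_pos he]
            exact hset _ hv.symm
          · rw [if_neg he, if_neg hnb, hmid, hcur, hprev, hprev2]
            have hv : lcsCell f s (i' + 1) (a' + 1)
                = max (lcsCell f s (i' + 1) a') (lcsCell f s i' (a' + 1)) := by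
              rw [lcsCell, if_neg he]
            exact hset _ hv.symm
      rw [hstep]
      have hc : ((a : Nat) : Int) + 1 = ((a + 1 : Nat) : Int) := by push_cast; ring
      rw [hc]
      exact ih (a + 1) (by omega) (by omega)

def aMatFull (f s : List String) (i : Nat) : List (List Int) :=
  (List.range i).map (lcsRow f s) ++ List.replicate (f.length - i) (List.replicate s.length 0)

theorem a_outer (f s : List String) : ∀ i, i ≤ f.length →
    (PySem.List.pyRange (i : Int) (f.length : Int) 1).foldl (fun m pi =>
      (PySem.List.pyRange 0 (s.length : Int) 1).foldl (fun m j =>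
        if PySem.List.pyGetD f pi "" = PySem.List.pyGetD s j "" then
          if pi - 1 < 0 ∨ j - 1 < 0 then pvMset m pi j 1
          else pvMset m pi j (PySem.List.pyGetD (PySem.List.pyGetD m (pi - 1) []) (j - 1) 0 + 1)
        else
          if pi - 1 < 0 ∨ j - 1 < 0 then pvMset m pi j 1
          else pvMset m pi j (max (PySem.List.pyGetD (PySem.List.pyGetD m pi []) (j - 1) 0)
                                  (PySem.List.pyGetD (PySem.List.pyGetD m (pi - 1) []) j 0))) m)
      (aMatFull f s i)
    = (List.range f.length).map (lcsRow f s) := by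
  intro i hi
  induction hn : f.length - i generalizing i with
  | zero =>
      have : i = f.length := by omega
      subst this
      rw [PySem.List.pyRange_one_eq_nil (le_refl _)]
      simp [aMatFull]
  | succ n ih =>
      have hilt : i < f.length := by omega
      have halt : (i : Int) < (f.length : Int) := by exact_mod_cast hilt
      rw [PySem.List.pyRange_one_cons halt, List.foldl_cons]
      have h0 : aMatFull f s i = aMat f s i 0 := by
        rw [aMatFull, aMat, aRowPart]
        have : f.length - i = (f.length - 1 - i) + 1 := by omega
        rw [this, List.replicate_succ]
        simp
      have hfin : aMat f s i s.length = aMatFull f s (i + 1) := by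
        rw [aMat, aRowPart, aMatFull]
        rw [Nat.sub_self, List.replicate_zero, List.append_nil, List.range_succ, List.map_append]
        have : f.length - (i + 1) = f.length - 1 - i := by omega
        rw [this]
        simp [lcsRow]
      have hinner := a_inner f s i hilt 0 (Nat.zero_le _)
      rw [Nat.cast_zero] at hinner
      rw [h0, hinner, hfin]
      have hc : (i : Int) + 1 = ((i + 1 : Nat) : Int) := by push_cast; ring
      rw [hc]
      exact ih (i + 1) hilt (by omega)

theorem a_eq_rows (f s : List String) (hf : f ≠ []) (hs : s ≠ []) :
    fill_lcs_matrix f s = (List.range f.length).map (lcsRow f s) := by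
  have hflen : 0 < f.length := List.length_pos_iff.mpr hf
  have hslen : 0 < s.length := List.length_pos_iff.mpr hs
  rw [fill_lcs_matrix, if_neg (by simp [hf, hs])]
  rw [PySem.List.enumerate_eq_map_pyRange f "", PySem.List.enumerate_eq_map_pyRange s ""]
  simp only [List.foldl_map]
  have hzero : create_zero_matrix (f.length : Int) (s.length : Int) = aMatFull f s 0 := by
    rw [create_zero_matrix, if_neg (by push Not; constructor <;> exact_mod_cast ‹_›)]
    rw [aMatFull]
    simp [List.map_const', PySem.List.length_pyRange_one]
  rw [hzero]
  have := a_outer f s 0 (Nat.zero_le _)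
  rw [Nat.cast_zero] at this
  exact this

-- ===== VERDICT (by name: the statement is the Claim_ definition above) =====
theorem fill_lcs_matrix_spec : Claim_equal_fill_lcs_matrix := by
  intro f s _
  unfold Spec_fill_lcs_matrix
  by_cases hf : f = []
  · simp [fill_lcs_matrix, fill_lcs_matrix_alt, hf]
  · by_cases hs : s = []
    · simp [fill_lcs_matrix, fill_lcs_matrix_alt, hs]
    · rw [a_eq_rows f s hf hs, alt_eq_rows f s hf hs]
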